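-- pv_equiv track=rewrite | github.com/wesleyyjpark/506MBTAProject | src/mbta/class_schedules.py | get_class_starts_at_time
-- ===== SOURCE A (Python) =====
-- STANDARD_PATTERNS = [
--     # Type A - 50 minute classes
--     {"days": "MWF", "start": "09:05", "end": "09:55", "duration_min": 50, "type": "A"},
--     {"days": "MWF", "start": "10:10", "end": "11:00", "duration_min": 50, "type": "A"},
--     {"days": "MWF", "start": "12:20", "end": "13:10", "duration_min": 50, "type": "A"},
--     {"days": "MWF", "start": "13:25", "end": "14:15", "duration_min": 50, "type": "A"},
--     {"days": "MWF", "start": "14:30", "end": "15:20", "duration_min": 50, "type": "A"},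
--     {"days": "MWF", "start": "16:40", "end": "17:30", "duration_min": 50, "type": "A"},
--
--     # Type B - 2:45 classes
--     {"days": "MTWRF", "start": "08:00", "end": "10:45", "duration_min": 165, "type": "B"},
--     {"days": "F", "start": "11:15", "end": "14:00", "duration_min": 165, "type": "B"},
--     {"days": "TR", "start": "12:30", "end": "15:15", "duration_min": 165, "type": "B"},
--     {"days": "MWF", "start": "14:30", "end": "17:15", "duration_min": 165, "type": "B"},
--     {"days": "TR", "start": "15:30", "end": "18:15", "duration_min": 165, "type": "B"},
--     {"days": "MTWRF", "start": "18:30", "end": "21:15", "duration_min": 165, "type": "B"},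
--
--     # Type C - 1:15 classes
--     {"days": "TR", "start": "08:00", "end": "09:15", "duration_min": 75, "type": "C"},
--     {"days": "TR", "start": "09:30", "end": "10:45", "duration_min": 75, "type": "C"},
--     {"days": "TR", "start": "11:00", "end": "12:15", "duration_min": 75, "type": "C"},
--     {"days": "TR", "start": "12:30", "end": "13:45", "duration_min": 75, "type": "C"},
--     {"days": "TR", "start": "14:00", "end": "15:15", "duration_min": 75, "type": "C"},
--     {"days": "TR", "start": "15:30", "end": "16:45", "duration_min": 75, "type": "C"},
--     {"days": "TR", "start": "17:00", "end": "18:15", "duration_min": 75, "type": "C"},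
--
--     # Type D - 1:45 classes
--     {"days": "MWF", "start": "08:00", "end": "09:45", "duration_min": 105, "type": "D"},
--     {"days": "MWF", "start": "10:10", "end": "11:55", "duration_min": 105, "type": "D"},
--     {"days": "MWF", "start": "12:20", "end": "14:05", "duration_min": 105, "type": "D"},
--     {"days": "MWF", "start": "14:30", "end": "16:15", "duration_min": 105, "type": "D"},
--     {"days": "MWF", "start": "16:30", "end": "18:15", "duration_min": 105, "type": "D"},
--     {"days": "TR", "start": "09:00", "end": "10:45", "duration_min": 105, "type": "D"},
--     {"days": "TR", "start": "13:30", "end": "15:15", "duration_min": 105, "type": "D"},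
--     {"days": "TR", "start": "15:30", "end": "17:15", "duration_min": 105, "type": "D"},
--
--     # Type E - 50 minute classes (daily)
--     {"days": "MTWRF", "start": "08:00", "end": "08:50", "duration_min": 50, "type": "E"},
--     {"days": "MTWRF", "start": "11:15", "end": "12:05", "duration_min": 50, "type": "E"},
--     {"days": "MTWRF", "start": "15:35", "end": "16:25", "duration_min": 50, "type": "E"},
-- ]
--
-- def get_class_starts_at_time(hour: int, minute: int, day_of_week: int) -> int:
--     """
--     Returns the number of classes starting at a given time on a given day.
--
--     Args:
--         hour: Hour (0-23)
--         minute: Minute (0-59)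
--         day_of_week: 0=Monday, 1=Tuesday, 2=Wednesday, 3=Thursday, 4=Friday, 5=Saturday, 6=Sunday
--
--     Returns:
--         Number of classes starting at that time
--     """
--     # Map day to letter
--     day_map = {
--         0: 'M',  # Monday
--         1: 'T',  # Tuesday
--         2: 'W',  # Wednesday
--         3: 'R',  # Thursday
--         4: 'F',  # Friday
--     }
--
--     if day_of_week not in day_map:
--         return 0  # No classes on weekends
--
--     day_letter = day_map[day_of_week]
--     time_str = f"{hour:02d}:{minute:02d}"
--
--     # Check each pattern
--     count = 0
--     for pattern in STANDARD_PATTERNS: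
--         if day_letter in pattern['days'] and pattern['start'] == time_str:
--             count += 1
--
--     return count
-- ===== SOURCE B (Python) =====
-- # Precomputed per-day start-time lists (STANDARD_PATTERNS expanded by day letter,
-- # multiplicity kept): each call is a dict lookup plus a list.count, no pattern scan.
-- _MWF = ['09:05', '10:10', '12:20', '13:25', '14:30', '16:40', '08:00', '14:30',
--         '18:30', '08:00', '10:10', '12:20', '14:30', '16:30', '08:00', '11:15', '15:35']
-- _TR = ['08:00', '12:30', '15:30', '18:30', '08:00', '09:30', '11:00', '12:30',
--        '14:00', '15:30', '17:00', '09:00', '13:30', '15:30', '08:00', '11:15', '15:35']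
-- _F = ['09:05', '10:10', '12:20', '13:25', '14:30', '16:40', '08:00', '11:15', '14:30',
--       '18:30', '08:00', '10:10', '12:20', '14:30', '16:30', '08:00', '11:15', '15:35']
--
-- _DAY_STARTS = {0: _MWF, 1: _TR, 2: _MWF, 3: _TR, 4: _F}
--
--
-- def get_class_starts_at_time(hour: int, minute: int, day_of_week: int) -> int:
--     starts = _DAY_STARTS.get(day_of_week)
--     if starts is None:
--         return 0  # weekends / out-of-range days
--     return starts.count(f"{hour:02d}:{minute:02d}")
-- ===== Notes on version B (the rewrite author's own statement) =====
-- stated objective: simpler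
-- what changed: B replaces A's per-call scan over all 31 patterns (substring day test + start comparison) with a precomputed day-of-week -> start-time-list table (patterns expanded once, multiplicity kept), so a call is one dict lookup plus a list.count.
import Mathlib
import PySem

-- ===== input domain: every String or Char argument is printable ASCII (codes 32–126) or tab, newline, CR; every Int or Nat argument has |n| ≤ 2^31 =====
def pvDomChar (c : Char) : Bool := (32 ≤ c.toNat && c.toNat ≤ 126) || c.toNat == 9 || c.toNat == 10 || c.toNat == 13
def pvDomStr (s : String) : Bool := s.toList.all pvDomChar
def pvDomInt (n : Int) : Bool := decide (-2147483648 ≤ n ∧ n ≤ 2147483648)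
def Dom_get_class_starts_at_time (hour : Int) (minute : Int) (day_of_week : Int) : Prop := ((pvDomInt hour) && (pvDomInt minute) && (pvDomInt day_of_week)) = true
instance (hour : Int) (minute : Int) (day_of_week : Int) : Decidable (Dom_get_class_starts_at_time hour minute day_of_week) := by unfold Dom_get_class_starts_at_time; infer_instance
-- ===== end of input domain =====

-- B replaces A's per-call scan of all patterns by a precomputed day-of-week → start-time-list
-- table (patterns expanded once, multiplicity kept): a call is a dict lookup plus a list count.
-- Objective: simpler per-call logic.

-- ===== PORT A =====
structure PvPattern where
  days : String
  start : String
  endt : String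
  duration_min : Int
  ty : String

def pvStandardPatterns : List PvPattern := [
  ⟨"MWF", "09:05", "09:55", 50, "A"⟩,
  ⟨"MWF", "10:10", "11:00", 50, "A"⟩,
  ⟨"MWF", "12:20", "13:10", 50, "A"⟩,
  ⟨"MWF", "13:25", "14:15", 50, "A"⟩,
  ⟨"MWF", "14:30", "15:20", 50, "A"⟩,
  ⟨"MWF", "16:40", "17:30", 50, "A"⟩,
  ⟨"MTWRF", "08:00", "10:45", 165, "B"⟩,
  ⟨"F", "11:15", "14:00", 165, "B"⟩,
  ⟨"TR", "12:30", "15:15", 165, "B"⟩,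
  ⟨"MWF", "14:30", "17:15", 165, "B"⟩,
  ⟨"TR", "15:30", "18:15", 165, "B"⟩,
  ⟨"MTWRF", "18:30", "21:15", 165, "B"⟩,
  ⟨"TR", "08:00", "09:15", 75, "C"⟩,
  ⟨"TR", "09:30", "10:45", 75, "C"⟩,
  ⟨"TR", "11:00", "12:15", 75, "C"⟩,
  ⟨"TR", "12:30", "13:45", 75, "C"⟩,
  ⟨"TR", "14:00", "15:15", 75, "C"⟩,
  ⟨"TR", "15:30", "16:45", 75, "C"⟩,
  ⟨"TR", "17:00", "18:15", 75, "C"⟩,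
  ⟨"MWF", "08:00", "09:45", 105, "D"⟩,
  ⟨"MWF", "10:10", "11:55", 105, "D"⟩,
  ⟨"MWF", "12:20", "14:05", 105, "D"⟩,
  ⟨"MWF", "14:30", "16:15", 105, "D"⟩,
  ⟨"MWF", "16:30", "18:15", 105, "D"⟩,
  ⟨"TR", "09:00", "10:45", 105, "D"⟩,
  ⟨"TR", "13:30", "15:15", 105, "D"⟩,
  ⟨"TR", "15:30", "17:15", 105, "D"⟩,
  ⟨"MTWRF", "08:00", "08:50", 50, "E"⟩,
  ⟨"MTWRF", "11:15", "12:05", 50, "E"⟩,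
  ⟨"MTWRF", "15:35", "16:25", 50, "E"⟩
]

-- f"{n:02d}" = str(n).zfill(2) (exact for all ints)
def pvFmt02 (n : Int) : String := PySem.Str.zfill (PySem.Int.toStr n) 2

def get_class_starts_at_time (hour : Int) (minute : Int) (day_of_week : Int) : Int :=
  let day_map : PySem.Dict Int String :=
    PySem.Dict.ofList [(0, "M"), (1, "T"), (2, "W"), (3, "R"), (4, "F")]
  if !(PySem.Dict.contains day_map day_of_week) then 0
  else
    let day_letter := (PySem.Dict.get? day_map day_of_week).getD ""
    let time_str := pvFmt02 hour ++ ":" ++ pvFmt02 minute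
    List.foldl (fun count pattern =>
        if PySem.Str.isIn day_letter pattern.days && (pattern.start == time_str)
        then count + 1 else count)
      (0 : Int) pvStandardPatterns

-- ===== PORT B =====
-- the per-day expansion of the standard patterns (literal in Source B)
def pvMWF : List String := ["09:05", "10:10", "12:20", "13:25", "14:30", "16:40", "08:00",
  "14:30", "18:30", "08:00", "10:10", "12:20", "14:30", "16:30", "08:00", "11:15", "15:35"]
def pvTR : List String := ["08:00", "12:30", "15:30", "18:30", "08:00", "09:30", "11:00",
  "12:30", "14:00", "15:30", "17:00", "09:00", "13:30", "15:30", "08:00", "11:15", "15:35"]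
def pvFri : List String := ["09:05", "10:10", "12:20", "13:25", "14:30", "16:40", "08:00",
  "11:15", "14:30", "18:30", "08:00", "10:10", "12:20", "14:30", "16:30", "08:00", "11:15", "15:35"]

def pvDayStarts : PySem.Dict Int (List String) :=
  PySem.Dict.ofList [(0, pvMWF), (1, pvTR), (2, pvMWF), (3, pvTR), (4, pvFri)]

def get_class_starts_at_time_alt (hour : Int) (minute : Int) (day_of_week : Int) : Int :=
  match PySem.Dict.get? pvDayStarts day_of_week with
  | none => 0
  | some starts => (PySem.List.count starts (pvFmt02 hour ++ ":" ++ pvFmt02 minute) : Int)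

-- ===== PRECONDITION & SPEC =====
def Spec_get_class_starts_at_time (hour : Int) (minute : Int) (day_of_week : Int) (out : Int) : Prop := out = get_class_starts_at_time_alt hour minute day_of_week
instance (hour : Int) (minute : Int) (day_of_week : Int) (out : Int) : Decidable (Spec_get_class_starts_at_time hour minute day_of_week out) := by unfold Spec_get_class_starts_at_time; infer_instance

-- ===== CLAIM (what is proved, stated in full; the proofs are below) =====
def Claim_equal_get_class_starts_at_time : Prop := ∀ (hour : Int) (minute : Int) (day_of_week : Int), Dom_get_class_starts_at_time hour minute day_of_week → Spec_get_class_starts_at_time hour minute day_of_week (get_class_starts_at_time hour minute day_of_week)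

-- ===== LEMMAS AND PROOFS =====

-- counting the patterns containing the day letter whose start equals t
-- is counting t in that day's filtered start list
lemma pvCountP_filterMap (L t : String) (l : List PvPattern) :
    l.countP (fun x => PySem.Str.isIn L x.days && (x.start == t))
      = (l.filterMap (fun p => if PySem.Str.isIn L p.days then some p.start else none)).count t := by
  induction l with
  | nil => rfl
  | cons x l ih =>
      rw [List.countP_cons, List.filterMap_cons]
      by_cases hf : PySem.Str.isIn L x.days = true
      · rw [if_pos hf, hf, Bool.true_and, List.count_cons, ih]
      · have hf' : PySem.Str.isIn L x.days = false := by simp_all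
        rw [hf', Bool.false_and, if_neg (by simp), ih]
        rfl

-- A's loop over the patterns, with the day letter fixed, is a count over
-- that day's expanded start list
lemma pvLoop_eq_count (L : String) (starts : List String)
    (hL : pvStandardPatterns.filterMap
        (fun p => if PySem.Str.isIn L p.days then some p.start else none) = starts)
    (t : String) :
    List.foldl (fun count pattern =>
        if PySem.Str.isIn L pattern.days && (pattern.start == t) then count + 1 else count)
      (0 : Int) pvStandardPatterns
      = (PySem.List.count starts t : Int) := by
  simp only [PySem.List.foldl_if_add_one, zero_add]
  rw [pvCountP_filterMap L t pvStandardPatterns, hL, PySem.List.count_eq]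

-- the two ports agree once the same day letter / start list is resolved on both sides
lemma pv_case (hour minute dow : Int) (L : String) (starts : List String)
    (hA : PySem.Dict.get? (PySem.Dict.ofList [((0:Int), "M"), (1, "T"), (2, "W"), (3, "R"), (4, "F")]) dow = some L)
    (hB : PySem.Dict.get? pvDayStarts dow = some starts)
    (hL : pvStandardPatterns.filterMap
        (fun p => if PySem.Str.isIn L p.days then some p.start else none) = starts) :
    get_class_starts_at_time hour minute dow = get_class_starts_at_time_alt hour minute dow := by
  have hc : PySem.Dict.contains (PySem.Dict.ofList [((0:Int), "M"), (1, "T"), (2, "W"), (3, "R"), (4, "F")]) dow = true := by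
    rw [PySem.Dict.contains_eq_isSome_get?, hA]; rfl
  unfold get_class_starts_at_time get_class_starts_at_time_alt
  simp only [hA, hB, hc, Bool.not_true, Bool.false_eq_true, if_false, Option.getD_some]
  exact pvLoop_eq_count L starts hL _

-- ===== VERDICT (by name: the statement is the Claim_ definition above) =====
theorem get_class_starts_at_time_spec : Claim_equal_get_class_starts_at_time := by
  intro hour minute dow _
  unfold Spec_get_class_starts_at_time
  by_cases h0 : dow = 0
  · subst h0; exact pv_case _ _ _ "M" pvMWF (by decide) (by decide) (by decide)
  by_cases h1 : dow = 1
  · subst h1; exact pv_case _ _ _ "T" pvTR (by decide) (by decide) (by decide)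
  by_cases h2 : dow = 2
  · subst h2; exact pv_case _ _ _ "W" pvMWF (by decide) (by decide) (by decide)
  by_cases h3 : dow = 3
  · subst h3; exact pv_case _ _ _ "R" pvTR (by decide) (by decide) (by decide)
  by_cases h4 : dow = 4
  · subst h4; exact pv_case _ _ _ "F" pvFri (by decide) (by decide) (by decide)
  -- weekend / out of range: both dict lookups miss and both return 0
  have hnA : PySem.Dict.get? (PySem.Dict.ofList [((0:Int), "M"), (1, "T"), (2, "W"), (3, "R"), (4, "F")]) dow = none := by
    have hk : PySem.Dict.keys (PySem.Dict.ofList [((0:Int), "M"), (1, "T"), (2, "W"), (3, "R"), (4, "F")]) = [0, 1, 2, 3, 4] := by decide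
    rw [PySem.Dict.get?_eq_none_iff_not_mem_keys, hk]
    simp only [List.mem_cons, List.not_mem_nil, or_false]
    omega
  have hnB : PySem.Dict.get? pvDayStarts dow = none := by
    have hk : PySem.Dict.keys pvDayStarts = [0, 1, 2, 3, 4] := by decide
    rw [PySem.Dict.get?_eq_none_iff_not_mem_keys, hk]
    simp only [List.mem_cons, List.not_mem_nil, or_false]
    omega
  have hc : PySem.Dict.contains (PySem.Dict.ofList [((0:Int), "M"), (1, "T"), (2, "W"), (3, "R"), (4, "F")]) dow = false := by
    rw [PySem.Dict.contains_eq_isSome_get?, hnA]; rfl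
  unfold get_class_starts_at_time get_class_starts_at_time_alt
  simp only [hnB, hc, Bool.not_false, if_true]
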